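-- pv_equiv track=rewrite | github.com/thohohong/baekjoon | q01941_7princess.py | adjacency
-- ===== SOURCE A (Python) =====
-- DIR = ((0, 1), (1, 0), (0, -1), (-1, 0))
--
-- def adjacency(comb) :
--     visit = [False for i in range(25)]
--     stack = []
--     stack.append(comb[0])
--
--     count = 1
--     visit[comb[0]] = True
--     while stack :
--         cur = stack.pop()
--         r, c = cur//5, cur%5
--
--         for dr, dc in DIR :
--             if r+dr < 0 or r+dr >= 5 or c+dc < 0 or c+dc >= 5 :
--                 continue
--             dem1 = (r+dr)*5 + (c+dc)
--
--             if dem1 not in comb :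
--                 continue
--
--             if visit[dem1] :
--                 continue
--
--             else :
--                 visit[dem1] = True
--                 stack.append(dem1)
--                 count += 1
--
--     if count == 7 :
--         return True
--     else :
--         return False
-- ===== SOURCE B (Python) =====
-- DIR = ((0, 1), (1, 0), (0, -1), (-1, 0))
--
-- def adjacency(comb):
--     start = comb[0]
--     cells = set(comb)
--     reach = {start}
--     for _ in range(25):  # 25 rounds saturate any component of the 5x5 grid
--         new = set()
--         for cell in reach:
--             r, c = divmod(cell, 5)
--             for dr, dc in DIR:
--                 if 0 <= r + dr < 5 and 0 <= c + dc < 5: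
--                     n = (r + dr) * 5 + (c + dc)
--                     if n in cells:
--                         new.add(n)
--         reach |= new
--     return len(reach) == 7
-- ===== Notes on version B (the rewrite author's own statement) =====
-- stated objective: alternative
-- what changed: Replaces A's explicit-stack DFS over a 25-slot visit array with counter by round-based set saturation: build set(comb) once, then repeatedly (25 rounds, enough for any component of the 5x5 grid) extend the reached set by every in-bounds grid neighbour that lies in the cell set, and finally compare the reached set's size with 7.
-- outside the precondition, e.g. on adjacency([-1, 4, 9, 14, 19, 24, 23]): A returns False, B returns True
import Mathlib
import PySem

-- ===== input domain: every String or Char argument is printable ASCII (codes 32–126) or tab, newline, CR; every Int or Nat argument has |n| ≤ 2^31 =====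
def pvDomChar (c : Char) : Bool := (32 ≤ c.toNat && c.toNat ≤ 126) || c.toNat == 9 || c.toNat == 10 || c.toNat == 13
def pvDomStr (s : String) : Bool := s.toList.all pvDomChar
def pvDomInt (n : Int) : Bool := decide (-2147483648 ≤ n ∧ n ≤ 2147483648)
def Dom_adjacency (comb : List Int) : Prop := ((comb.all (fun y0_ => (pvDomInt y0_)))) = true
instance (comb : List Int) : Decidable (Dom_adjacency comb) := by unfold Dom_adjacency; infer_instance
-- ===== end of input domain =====

-- B replaces A's stack DFS (visit array + counter) by round-based set saturation to a fixpoint; alternative decomposition, no speed claim.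

-- ===== PORT A =====
def dirA : List (Int × Int) := [(0,1), (1,0), (0,-1), (-1,0)]

-- body of 'for dr, dc in DIR' over state (visit, stack, count)
def stepA (comb : List Int) (r c : Int) (st : List Bool × List Int × Int) (d : Int × Int) :
    List Bool × List Int × Int :=
  if r + d.1 < 0 ∨ 5 ≤ r + d.1 ∨ c + d.2 < 0 ∨ 5 ≤ c + d.2 then st
  else
    let dem1 := (r + d.1) * 5 + (c + d.2)
    if dem1 ∉ comb then st
    else if PySem.List.pyGetD st.1 dem1 false then st
    else (PySem.List.pySetD st.1 dem1 true, st.2.1 ++ [dem1], st.2.2 + 1)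

-- 'while stack:' with a fuel parameter; 50 exceeds the proved iteration bound, so the
-- fuel-exhausted branch is unreachable on inputs satisfying Pre_ (a pure totality guard).
def whileA (comb : List Int) : Nat → List Bool → List Int → Int → Int
  | _, _visit, [], count => count
  | 0, _visit, _ :: _, count => count
  | fuel+1, visit, x :: xs, count =>
    let cur := (x :: xs).getLast (List.cons_ne_nil x xs)   -- cur = stack.pop()
    let rest := (x :: xs).dropLast
    let r := PySem.Int.floordiv cur 5
    let c := PySem.Int.mod cur 5
    let st := dirA.foldl (stepA comb r c) (visit, rest, count)
    whileA comb fuel st.1 st.2.1 st.2.2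

def adjacency (comb : List Int) : Bool :=
  let visit : List Bool := (PySem.List.pyRange 0 25 1).map (fun _ => false)
  match PySem.List.pyGet? comb 0 with
  | none => false   -- comb[0] raises IndexError: outside Pre_
  | some c0 =>
    let stack : List Int := [] ++ [c0]                     -- stack.append(comb[0])
    let count : Int := 1
    let visit := PySem.List.pySetD visit c0 true           -- visit[comb[0]] = True (in range under Pre_)
    let res := whileA comb 50 visit stack count
    if res == 7 then true else false

-- ===== PORT B =====
def dirB : List (Int × Int) := [(0,1), (1,0), (0,-1), (-1,0)]

-- body of 'for dr, dc in DIR' accumulating the set 'new'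
def nbrStepB (cells : PySem.Set Int) (r c : Int) (nw : PySem.Set Int) (d : Int × Int) :
    PySem.Set Int :=
  if 0 ≤ r + d.1 ∧ r + d.1 < 5 ∧ 0 ≤ c + d.2 ∧ c + d.2 < 5 then
    let n := (r + d.1) * 5 + (c + d.2)
    if n ∈ cells then PySem.Set.add nw n else nw
  else nw

-- one round of the saturation loop body: new = {...}; reach |= new
def roundB (cells : PySem.Set Int) (reach : PySem.Set Int) : PySem.Set Int :=
  let nw := reach.foldl (fun nw cell =>
    let r := PySem.Int.floordiv cell 5
    let c := PySem.Int.mod cell 5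
    dirB.foldl (nbrStepB cells r c) nw) PySem.Set.empty
  PySem.Set.union reach nw

def adjacency_alt (comb : List Int) : Bool :=
  match PySem.List.pyGet? comb 0 with
  | none => false   -- comb[0] raises IndexError: outside Pre_
  | some start =>
    let cells : PySem.Set Int := PySem.Set.ofList comb
    let reach : PySem.Set Int := PySem.Set.ofList [start]
    let reach := (List.range 25).foldl (fun reach _ => roundB cells reach) reach
    PySem.Set.len reach == 7

-- ===== PRECONDITION & SPEC =====
-- Pre_ excludes the empty list (A raises IndexError there), a first cell greater than 24 or smaller
-- than -25 (A raises IndexError on the visit list), and a negative first cell, which is outside the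
-- task's natural domain of 5×5 grid cells: A's value on a negative first cell goes through Python's
-- negative-index wraparound on the visit list.
def Pre_adjacency (comb : List Int) : Prop :=
  comb ≠ [] ∧ 0 ≤ comb.headD 0 ∧ comb.headD 0 < 25
instance (comb : List Int) : Decidable (Pre_adjacency comb) := by unfold Pre_adjacency; infer_instance
def pvWitness_adjacency : List Int := [0, 1, 2, 3, 4, 5, 6]
def Spec_adjacency (comb : List Int) (out : Bool) : Prop := out = adjacency_alt comb
instance (comb : List Int) (out : Bool) : Decidable (Spec_adjacency comb out) := by unfold Spec_adjacency; infer_instance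

-- ===== CLAIM (what is proved, stated in full; the proofs are below) =====
def Claim_equal_adjacency : Prop := ∀ (comb : List Int), Dom_adjacency comb → Pre_adjacency comb → Spec_adjacency comb (adjacency comb)

-- ===== LEMMAS AND PROOFS =====

-- the in-bounds neighbour candidates of a cell, shared vocabulary for both ports
def cand (r c : Int) (ds : List (Int × Int)) : List Int :=
  ds.filterMap (fun d =>
    if 0 ≤ r + d.1 ∧ r + d.1 < 5 ∧ 0 ≤ c + d.2 ∧ c + d.2 < 5 then
      some ((r + d.1) * 5 + (c + d.2)) else none)

def nbr (x : Int) : List Int := cand (PySem.Int.floordiv x 5) (PySem.Int.mod x 5) dirA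

-- reachability from s through neighbours that are members of comb
inductive Reach (comb : List Int) (s : Int) : Int → Prop
  | refl : Reach comb s s
  | tail {y z : Int} : Reach comb s y → z ∈ nbr y → z ∈ comb → Reach comb s z

def Vis (visit : List Bool) (y : Int) : Prop :=
  0 ≤ y ∧ y < 25 ∧ visit.getD y.toNat false = true

def cardV (visit : List Bool) : Nat :=
  ((Finset.range 25).filter (fun i => visit.getD i false = true)).card

-- A's per-candidate action, the common normal form of stepA
def mark (comb : List Int) (st : List Bool × List Int × Int) (e : Int) :
    List Bool × List Int × Int :=
  if e ∉ comb then st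
  else if PySem.List.pyGetD st.1 e false then st
  else (PySem.List.pySetD st.1 e true, st.2.1 ++ [e], st.2.2 + 1)

-- B's per-candidate action
def addIf (comb : List Int) (s : PySem.Set Int) (n : Int) : PySem.Set Int :=
  if n ∈ comb then PySem.Set.add s n else s

def InvA (comb : List Int) (c0 : Int) (visit : List Bool) (stack : List Int) (count : Int) : Prop :=
  visit.length = 25 ∧
  count = (cardV visit : Int) ∧
  Vis visit c0 ∧
  (∀ y ∈ stack, Vis visit y ∧ Reach comb c0 y) ∧
  (∀ y, Vis visit y → Reach comb c0 y) ∧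
  (∀ y, Vis visit y → y ∉ stack → ∀ z, z ∈ nbr y → z ∈ comb → Vis visit z)

lemma cand_range (r c : Int) (ds : List (Int × Int)) : ∀ e ∈ cand r c ds, 0 ≤ e ∧ e < 25 := by
  intro e he
  simp only [cand, List.mem_filterMap] at he
  obtain ⟨d, _, hd⟩ := he
  split at hd
  · rename_i h
    simp only [Option.some.injEq] at hd
    omega
  · simp at hd

lemma nbr_range (x : Int) : ∀ e ∈ nbr x, 0 ≤ e ∧ e < 25 := cand_range _ _ _

lemma cardV_le (visit : List Bool) : cardV visit ≤ 25 := by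
  unfold cardV
  exact le_trans (Finset.card_filter_le _ _) (by simp)

-- bridge: Python visit[m] on an in-range index is plain getD
lemma pyGetD_eq_getD (visit : List Bool) (m : Int) (h0 : 0 ≤ m) (h1 : m < visit.length) :
    PySem.List.pyGetD visit m false = visit.getD m.toNat false := by
  rw [PySem.List.pyGetD_eq_getElem _ _ h0 h1, List.getD_eq_getElem _ _ (by omega)]

lemma getD_set_nat (visit : List Bool) (e i : Nat) (v : Bool) (hi : i < visit.length) :
    (visit.set e v).getD i false = if i = e then v else visit.getD i false := by
  rw [List.getD_eq_getElem _ _ (by simpa using hi), List.getD_eq_getElem _ _ hi,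
    List.getElem_set]
  by_cases h : i = e
  · subst h; simp
  · rw [if_neg (by omega), if_neg h]

lemma stepA_eq_mark (comb : List Int) (r c : Int) (st : List Bool × List Int × Int) (d : Int × Int) :
    stepA comb r c st d =
      if 0 ≤ r + d.1 ∧ r + d.1 < 5 ∧ 0 ≤ c + d.2 ∧ c + d.2 < 5 then
        mark comb st ((r + d.1) * 5 + (c + d.2)) else st := by
  by_cases h : 0 ≤ r + d.1 ∧ r + d.1 < 5 ∧ 0 ≤ c + d.2 ∧ c + d.2 < 5
  · rw [if_pos h]; unfold stepA mark; rw [if_neg (by omega)]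
  · rw [if_neg h]; unfold stepA; rw [if_pos (by omega)]

lemma foldl_stepA_eq (comb : List Int) (r c : Int) :
    ∀ (ds : List (Int × Int)) (st : List Bool × List Int × Int),
      ds.foldl (stepA comb r c) st = (cand r c ds).foldl (mark comb) st := by
  intro ds
  induction ds with
  | nil => intro st; rfl
  | cons d ds ih =>
    intro st
    by_cases h : 0 ≤ r + d.1 ∧ r + d.1 < 5 ∧ 0 ≤ c + d.2 ∧ c + d.2 < 5
    · simp only [List.foldl_cons, cand, List.filterMap_cons, if_pos h, stepA_eq_mark]
      exact ih _
    · simp only [List.foldl_cons, cand, List.filterMap_cons, if_neg h, stepA_eq_mark]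
      exact ih _

lemma foldl_mark (comb : List Int) :
    ∀ (L : List Int) (visit : List Bool) (stack : List Int) (count : Int),
      visit.length = 25 → (∀ e ∈ L, 0 ≤ e ∧ e < 25) → count = (cardV visit : Int) →
      (L.foldl (mark comb) (visit, stack, count)).1.length = 25 ∧
      (L.foldl (mark comb) (visit, stack, count)).2.2 = (cardV (L.foldl (mark comb) (visit, stack, count)).1 : Int) ∧
      (∀ y, Vis (L.foldl (mark comb) (visit, stack, count)).1 y ↔ Vis visit y ∨ (y ∈ L ∧ y ∈ comb)) ∧
      (∀ y, y ∈ (L.foldl (mark comb) (visit, stack, count)).2.1 ↔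
        y ∈ stack ∨ (Vis (L.foldl (mark comb) (visit, stack, count)).1 y ∧ ¬ Vis visit y)) ∧
      2 * (25 - cardV (L.foldl (mark comb) (visit, stack, count)).1) + (L.foldl (mark comb) (visit, stack, count)).2.1.length ≤
        2 * (25 - cardV visit) + stack.length := by
  intro L
  induction L with
  | nil =>
    intro visit stack count hlen hL hcount
    refine ⟨hlen, hcount, ?_, ?_, le_refl _⟩
    · intro y; simp
    · intro y
      constructor
      · intro hy; exact Or.inl hy
      · rintro (hy | ⟨h1, h2⟩)
        · exact hy
        · exact absurd h1 h2
  | cons e L ih =>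
    intro visit stack count hlen hL hcount
    have he' : 0 ≤ e ∧ e < 25 := hL e (List.mem_cons_self ..)
    have hbridge : PySem.List.pyGetD visit e false = visit.getD e.toNat false :=
      pyGetD_eq_getD visit e he'.1 (by omega)
    simp only [List.foldl_cons]
    by_cases he : e ∈ comb
    · by_cases hv : PySem.List.pyGetD visit e false = true
      · -- already visited: no-op
        have hVe : Vis visit e := ⟨he'.1, he'.2, by rw [← hbridge]; exact hv⟩
        have hm : mark comb (visit, stack, count) e = (visit, stack, count) := by
          unfold mark; rw [if_neg (not_not_intro he), if_pos hv]
        rw [hm]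
        obtain ⟨ih1, ih2, ih3, ih4, ih5⟩ := ih visit stack count hlen
          (fun x hx => hL x (List.mem_cons_of_mem _ hx)) hcount
        refine ⟨ih1, ih2, ?_, ih4, ih5⟩
        intro y
        rw [ih3 y]
        constructor
        · rintro (hy | ⟨hy1, hy2⟩)
          · exact Or.inl hy
          · exact Or.inr ⟨List.mem_cons_of_mem _ hy1, hy2⟩
        · rintro (hy | ⟨hy1, hy2⟩)
          · exact Or.inl hy
          · rcases List.mem_cons.mp hy1 with rfl | hy1
            · exact Or.inl hVe
            · exact Or.inr ⟨hy1, hy2⟩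
      · -- new cell: mark it, push it, count it
        have hNVe : ¬ Vis visit e := by
          intro hVe; exact hv (by rw [hbridge]; exact hVe.2.2)
        have hm : mark comb (visit, stack, count) e =
            (PySem.List.pySetD visit e true, stack ++ [e], count + 1) := by
          unfold mark; rw [if_neg (not_not_intro he), if_neg hv]
        rw [hm]
        have hset : PySem.List.pySetD visit e true = visit.set e.toNat true :=
          PySem.List.pySetD_of_nonneg _ _ he'.1
        have hlen' : (PySem.List.pySetD visit e true).length = 25 := by
          rw [PySem.List.length_pySetD, hlen]
        have hVis' : ∀ y, Vis (PySem.List.pySetD visit e true) y ↔ Vis visit y ∨ y = e := by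
          intro y
          unfold Vis
          rw [hset]
          constructor
          · rintro ⟨hy0, hy1, hg⟩
            rw [getD_set_nat _ _ _ _ (by omega)] at hg
            by_cases hye : y.toNat = e.toNat
            · exact Or.inr (by omega)
            · rw [if_neg hye] at hg
              exact Or.inl ⟨hy0, hy1, hg⟩
          · rintro (⟨hy0, hy1, hg⟩ | rfl)
            · refine ⟨hy0, hy1, ?_⟩
              rw [getD_set_nat _ _ _ _ (by omega)]
              by_cases hye : y.toNat = e.toNat
              · rw [if_pos hye]
              · rw [if_neg hye]; exact hg
            · refine ⟨he'.1, he'.2, ?_⟩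
              rw [getD_set_nat _ _ _ _ (by omega), if_pos rfl]
        have hcard' : cardV (PySem.List.pySetD visit e true) = cardV visit + 1 := by
          unfold cardV
          rw [hset]
          have hfe : (Finset.range 25).filter (fun i => (visit.set e.toNat true).getD i false = true) =
              insert e.toNat ((Finset.range 25).filter (fun i => visit.getD i false = true)) := by
            ext i
            simp only [Finset.mem_filter, Finset.mem_insert, Finset.mem_range]
            constructor
            · rintro ⟨hi, hgi⟩
              rw [getD_set_nat _ _ _ _ (by omega)] at hgi
              by_cases hie : i = e.toNat
              · exact Or.inl hie
              · rw [if_neg hie] at hgi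
                exact Or.inr ⟨hi, hgi⟩
            · rintro (rfl | ⟨hi, hgi⟩)
              · refine ⟨by omega, ?_⟩
                rw [getD_set_nat _ _ _ _ (by omega), if_pos rfl]
              · refine ⟨hi, ?_⟩
                rw [getD_set_nat _ _ _ _ (by omega)]
                by_cases hie : i = e.toNat
                · rw [if_pos hie]
                · rw [if_neg hie]; exact hgi
          rw [hfe, Finset.card_insert_of_notMem]
          simp only [Finset.mem_filter, Finset.mem_range, not_and]
          intro _
          rw [← hbridge]
          simpa using hv
        have hcount' : count + 1 = (cardV (PySem.List.pySetD visit e true) : Int) := by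
          rw [hcard', hcount]; push_cast; ring
        obtain ⟨ih1, ih2, ih3, ih4, ih5⟩ := ih (PySem.List.pySetD visit e true) (stack ++ [e])
          (count + 1) hlen' (fun x hx => hL x (List.mem_cons_of_mem _ hx)) hcount'
        have hVisFinE : Vis (L.foldl (mark comb) (PySem.List.pySetD visit e true, stack ++ [e], count + 1)).1 e :=
          (ih3 e).mpr (Or.inl ((hVis' e).mpr (Or.inr rfl)))
        refine ⟨ih1, ih2, ?_, ?_, ?_⟩
        · intro y
          rw [ih3 y]
          constructor
          · rintro (hy | ⟨hy1, hy2⟩)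
            · rcases (hVis' y).mp hy with hy | rfl
              · exact Or.inl hy
              · exact Or.inr ⟨List.mem_cons_self .., he⟩
            · exact Or.inr ⟨List.mem_cons_of_mem _ hy1, hy2⟩
          · rintro (hy | ⟨hy1, hy2⟩)
            · exact Or.inl ((hVis' y).mpr (Or.inl hy))
            · rcases List.mem_cons.mp hy1 with rfl | hy1
              · exact Or.inl ((hVis' y).mpr (Or.inr rfl))
              · exact Or.inr ⟨hy1, hy2⟩
        · intro y
          rw [ih4 y]
          constructor
          · rintro (hy | ⟨hf, hnv⟩)
            · rcases List.mem_append.mp hy with hy | hy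
              · exact Or.inl hy
              · rcases List.mem_singleton.mp hy with rfl
                exact Or.inr ⟨hVisFinE, hNVe⟩
            · refine Or.inr ⟨hf, fun h => hnv ((hVis' y).mpr (Or.inl h))⟩
          · rintro (hy | ⟨hf, hnv⟩)
            · exact Or.inl (List.mem_append.mpr (Or.inl hy))
            · by_cases hye : y = e
              · subst hye
                exact Or.inl (List.mem_append.mpr (Or.inr (List.mem_singleton.mpr rfl)))
              · refine Or.inr ⟨hf, fun h => ?_⟩
                rcases (hVis' y).mp h with h | h
                · exact hnv h
                · exact hye h
        · have hle : cardV (PySem.List.pySetD visit e true) ≤ 25 := cardV_le _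
          rw [List.length_append, List.length_singleton] at ih5
          omega
    · -- e not in comb: no-op
      have hm : mark comb (visit, stack, count) e = (visit, stack, count) := by
        unfold mark; rw [if_pos he]
      rw [hm]
      obtain ⟨ih1, ih2, ih3, ih4, ih5⟩ := ih visit stack count hlen
        (fun x hx => hL x (List.mem_cons_of_mem _ hx)) hcount
      refine ⟨ih1, ih2, ?_, ih4, ih5⟩
      intro y
      rw [ih3 y]
      constructor
      · rintro (hy | ⟨hy1, hy2⟩)
        · exact Or.inl hy
        · exact Or.inr ⟨List.mem_cons_of_mem _ hy1, hy2⟩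
      · rintro (hy | ⟨hy1, hy2⟩)
        · exact Or.inl hy
        · rcases List.mem_cons.mp hy1 with rfl | hy1
          · exact absurd hy2 he
          · exact Or.inr ⟨hy1, hy2⟩

lemma whileA_empty (comb : List Int) (c0 : Int) (fuel : Nat) (visit : List Bool) (count : Int)
    (hInv : InvA comb c0 visit [] count) :
    ∃ visit', whileA comb fuel visit [] count = (cardV visit' : Int) ∧
      (∀ y, Vis visit' y ↔ Reach comb c0 y) := by
  obtain ⟨hlen, hcount, hc0, hstack, hsound, hclosed⟩ := hInv
  refine ⟨visit, ?_, ?_⟩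
  · cases fuel <;> exact hcount
  · intro y
    constructor
    · exact hsound y
    · intro hy
      induction hy with
      | refl => exact hc0
      | tail hr hn hc ihy => exact hclosed _ ihy (List.not_mem_nil) _ hn hc

lemma whileA_run (comb : List Int) (c0 : Int) :
    ∀ (fuel : Nat) (visit : List Bool) (stack : List Int) (count : Int),
      InvA comb c0 visit stack count →
      2 * (25 - cardV visit) + stack.length ≤ fuel →
      ∃ visit', whileA comb fuel visit stack count = (cardV visit' : Int) ∧
        (∀ y, Vis visit' y ↔ Reach comb c0 y) := by
  intro fuel
  induction fuel with
  | zero =>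
    intro visit stack count hInv hfuel
    cases stack with
    | nil => exact whileA_empty comb c0 0 visit count hInv
    | cons x xs =>
      exfalso
      simp only [List.length_cons] at hfuel
      omega
  | succ fuel ih =>
    intro visit stack count hInv hfuel
    cases stack with
    | nil => exact whileA_empty comb c0 (fuel + 1) visit count hInv
    | cons x xs =>
      obtain ⟨hlen, hcount, hc0, hstack, hsound, hclosed⟩ := hInv
      have hcurmem : (x :: xs).getLast (List.cons_ne_nil x xs) ∈ x :: xs := List.getLast_mem _
      have hdecomp : (x :: xs).dropLast ++ [(x :: xs).getLast (List.cons_ne_nil x xs)] = x :: xs :=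
        List.dropLast_append_getLast _
      have hrestlen : (x :: xs).dropLast.length + 1 = (x :: xs).length := by
        conv_rhs => rw [← hdecomp]
        simp
      obtain ⟨hVcur, hRcur⟩ := hstack _ hcurmem
      have hstep : whileA comb (fuel + 1) visit (x :: xs) count =
          whileA comb fuel
            ((nbr ((x :: xs).getLast (List.cons_ne_nil x xs))).foldl (mark comb)
              (visit, (x :: xs).dropLast, count)).1
            ((nbr ((x :: xs).getLast (List.cons_ne_nil x xs))).foldl (mark comb)
              (visit, (x :: xs).dropLast, count)).2.1
            ((nbr ((x :: xs).getLast (List.cons_ne_nil x xs))).foldl (mark comb)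
              (visit, (x :: xs).dropLast, count)).2.2 := by
        rw [whileA]
        simp only [foldl_stepA_eq]
        rfl
      rw [hstep]
      obtain ⟨f1, f2, f3, f4, f5⟩ := foldl_mark comb (nbr ((x :: xs).getLast (List.cons_ne_nil x xs)))
        visit ((x :: xs).dropLast) count hlen (nbr_range _) hcount
      apply ih
      · refine ⟨f1, f2, ?_, ?_, ?_, ?_⟩
        · exact (f3 c0).mpr (Or.inl hc0)
        · intro y hy
          rcases (f4 y).mp hy with hy | ⟨hfv, hnv⟩
          · have hymem : y ∈ x :: xs := by
              rw [← hdecomp]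
              exact List.mem_append.mpr (Or.inl hy)
            obtain ⟨hv, hr⟩ := hstack y hymem
            exact ⟨(f3 y).mpr (Or.inl hv), hr⟩
          · rcases (f3 y).mp hfv with hv | ⟨hn, hc⟩
            · exact absurd hv hnv
            · exact ⟨hfv, Reach.tail hRcur hn hc⟩
        · intro y hy
          rcases (f3 y).mp hy with hv | ⟨hn, hc⟩
          · exact hsound y hv
          · exact Reach.tail hRcur hn hc
        · intro y hyv hystack z hzn hzc
          by_cases hve : Vis visit y
          · by_cases hyc : y = (x :: xs).getLast (List.cons_ne_nil x xs)
            · subst hyc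
              exact (f3 z).mpr (Or.inr ⟨hzn, hzc⟩)
            · have hynr : y ∉ (x :: xs).dropLast := fun h => hystack ((f4 y).mpr (Or.inl h))
              have hyns : y ∉ x :: xs := by
                rw [← hdecomp]
                intro h
                rcases List.mem_append.mp h with h | h
                · exact hynr h
                · exact hyc (List.mem_singleton.mp h)
              exact (f3 z).mpr (Or.inl (hclosed y hve hyns z hzn hzc))
          · exact absurd ((f4 y).mpr (Or.inr ⟨hyv, hve⟩)) hystack
      · simp only [List.length_cons] at hfuel
        have hxl : (x :: xs).length = xs.length + 1 := by simp
        omega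

-- ----- B side -----

lemma nbrStepB_eq (comb : List Int) (r c : Int) (s : PySem.Set Int) (d : Int × Int) :
    nbrStepB (PySem.Set.ofList comb) r c s d =
      if 0 ≤ r + d.1 ∧ r + d.1 < 5 ∧ 0 ≤ c + d.2 ∧ c + d.2 < 5 then
        addIf comb s ((r + d.1) * 5 + (c + d.2)) else s := by
  unfold nbrStepB addIf
  simp only [PySem.Set.mem_ofList]

lemma foldl_nbrStepB_eq (comb : List Int) (r c : Int) :
    ∀ (ds : List (Int × Int)) (s : PySem.Set Int),
      ds.foldl (nbrStepB (PySem.Set.ofList comb) r c) s = (cand r c ds).foldl (addIf comb) s := by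
  intro ds
  induction ds with
  | nil => intro s; rfl
  | cons d ds ih =>
    intro s
    by_cases h : 0 ≤ r + d.1 ∧ r + d.1 < 5 ∧ 0 ≤ c + d.2 ∧ c + d.2 < 5
    · simp only [List.foldl_cons, cand, List.filterMap_cons, if_pos h, nbrStepB_eq]
      exact ih _
    · simp only [List.foldl_cons, cand, List.filterMap_cons, if_neg h, nbrStepB_eq]
      exact ih _

lemma mem_foldl_addIf (comb : List Int) :
    ∀ (L : List Int) (s : PySem.Set Int) (y : Int),
      y ∈ L.foldl (addIf comb) s ↔ y ∈ s ∨ (y ∈ L ∧ y ∈ comb) := by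
  intro L
  induction L with
  | nil => simp
  | cons n L ih =>
    intro s y
    simp only [List.foldl_cons, ih, List.mem_cons]
    unfold addIf
    by_cases h : n ∈ comb
    · rw [if_pos h]
      simp only [PySem.Set.mem_add]
      constructor
      · rintro ((hy | rfl) | hy)
        · exact Or.inl hy
        · exact Or.inr ⟨Or.inl rfl, h⟩
        · exact Or.inr ⟨Or.inr hy.1, hy.2⟩
      · rintro (hy | ⟨(rfl | hy), hc⟩)
        · exact Or.inl (Or.inl hy)
        · exact Or.inl (Or.inr rfl)
        · exact Or.inr ⟨hy, hc⟩
    · rw [if_neg h]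
      constructor
      · rintro (hy | hy)
        · exact Or.inl hy
        · exact Or.inr ⟨Or.inr hy.1, hy.2⟩
      · rintro (hy | ⟨(rfl | hy), hc⟩)
        · exact Or.inl hy
        · exact absurd hc h
        · exact Or.inr ⟨hy, hc⟩

lemma mem_inner (comb : List Int) :
    ∀ (l : List Int) (acc : PySem.Set Int) (y : Int),
      y ∈ l.foldl (fun nw cell => (nbr cell).foldl (addIf comb) nw) acc ↔
        y ∈ acc ∨ ∃ x ∈ l, y ∈ nbr x ∧ y ∈ comb := by
  intro l
  induction l with
  | nil => simp
  | cons cell l ih =>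
    intro acc y
    simp only [List.foldl_cons, ih, mem_foldl_addIf, List.mem_cons]
    constructor
    · rintro ((hy | hy) | ⟨x, hx, hn⟩)
      · exact Or.inl hy
      · exact Or.inr ⟨cell, Or.inl rfl, hy⟩
      · exact Or.inr ⟨x, Or.inr hx, hn⟩
    · rintro (hy | ⟨x, (rfl | hx), hn⟩)
      · exact Or.inl (Or.inl hy)
      · exact Or.inl (Or.inr hn)
      · exact Or.inr ⟨x, hx, hn⟩

lemma mem_roundB (comb : List Int) (reach : PySem.Set Int) (y : Int) :
    y ∈ roundB (PySem.Set.ofList comb) reach ↔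
      y ∈ reach ∨ ∃ x ∈ reach, y ∈ nbr x ∧ y ∈ comb := by
  have hf : (fun (nw : PySem.Set Int) (cell : Int) =>
      let r := PySem.Int.floordiv cell 5
      let c := PySem.Int.mod cell 5
      dirB.foldl (nbrStepB (PySem.Set.ofList comb) r c) nw) =
      (fun nw cell => (nbr cell).foldl (addIf comb) nw) := by
    funext nw cell
    show dirB.foldl (nbrStepB (PySem.Set.ofList comb) _ _) nw = _
    rw [foldl_nbrStepB_eq]
    rfl
  unfold roundB
  rw [PySem.Set.mem_union, hf, mem_inner]
  constructor
  · rintro (hy | (hy | hx))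
    · exact Or.inl hy
    · exact absurd hy (by simp [PySem.Set.empty])
    · exact Or.inr hx
  · rintro (hy | hx)
    · exact Or.inl hy
    · exact Or.inr (Or.inr hx)

lemma roundB_prefix (cells reach : PySem.Set Int) :
    ∃ ex, roundB cells reach = reach ++ ex := by
  unfold roundB PySem.Set.union
  exact ⟨_, PySem.Set.update_eq_append_filter _ _⟩

lemma foldl_range_const {α : Type} (f : α → α) :
    ∀ (n : Nat) (init : α), (List.range n).foldl (fun r _ => f r) init = f^[n] init := by
  intro n
  induction n with
  | zero => intro init; rfl
  | succ n ih =>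
    intro init
    rw [List.range_succ, List.foldl_append, ih, Function.iterate_succ_apply']
    rfl

def PB (comb : List Int) (c0 : Int) (r : PySem.Set Int) : Prop :=
  r.Nodup ∧ (∀ y ∈ r, 0 ≤ y ∧ y < 25) ∧ (∀ y ∈ r, Reach comb c0 y) ∧ c0 ∈ r

lemma PB_roundB (comb : List Int) (c0 : Int) (r : PySem.Set Int)
    (h : PB comb c0 r) : PB comb c0 (roundB (PySem.Set.ofList comb) r) := by
  obtain ⟨hnd, hrange, hreach, hc0⟩ := h
  refine ⟨PySem.Set.nodup_union _ _ hnd, ?_, ?_, (mem_roundB ..).mpr (Or.inl hc0)⟩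
  · intro y hy
    rcases (mem_roundB ..).mp hy with hy | ⟨x, _, hn, _⟩
    · exact hrange y hy
    · exact nbr_range x y hn
  · intro y hy
    rcases (mem_roundB ..).mp hy with hy | ⟨x, hx, hn, hc⟩
    · exact hreach y hy
    · exact Reach.tail (hreach x hx) hn hc

lemma len_le_25 (l : List Int) (hnd : l.Nodup) (hr : ∀ y ∈ l, 0 ≤ y ∧ y < 25) :
    l.length ≤ 25 := by
  have h1 : l.toFinset ⊆ Finset.Ico (0:Int) 25 := by
    intro y hy
    rw [List.mem_toFinset] at hy
    rw [Finset.mem_Ico]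
    exact (hr y hy).imp id (fun h => h)
  have h2 := Finset.card_le_card h1
  rw [List.toFinset_card_of_nodup hnd, Int.card_Ico] at h2
  simpa using h2

lemma saturation (comb : List Int) (c0 : Int) (h0 : 0 ≤ c0 ∧ c0 < 25) :
    PB comb c0 ((fun r => roundB (PySem.Set.ofList comb) r)^[25] [c0]) ∧
    (∀ y, y ∈ ((fun r => roundB (PySem.Set.ofList comb) r)^[25] [c0]) ↔ Reach comb c0 y) := by
  set f : PySem.Set Int → PySem.Set Int := fun r => roundB (PySem.Set.ofList comb) r with hfdef
  set g : Nat → PySem.Set Int := fun k => f^[k] [c0] with hgdef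
  have hg0 : g 0 = [c0] := rfl
  have hgs : ∀ k, g (k + 1) = f (g k) := by
    intro k; simp only [hgdef, Function.iterate_succ_apply']
  have hPB : ∀ k, PB comb c0 (g k) := by
    intro k
    induction k with
    | zero =>
      refine ⟨List.nodup_singleton _, ?_, ?_, by simp [hg0]⟩
      · intro y hy
        rw [hg0] at hy
        simp at hy
        subst hy
        exact h0
      · intro y hy
        rw [hg0] at hy
        simp at hy
        subst hy
        exact Reach.refl
    | succ k ih => rw [hgs]; exact PB_roundB comb c0 _ ih
  have hpre : ∀ k, ∃ ex, g (k + 1) = g k ++ ex := by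
    intro k; rw [hgs]; exact roundB_prefix _ _
  -- some round before 25 is already a fixpoint
  have hstab : ∃ k, k < 25 ∧ g (k + 1) = g k := by
    by_contra hcon
    push Not at hcon
    have hlen : ∀ k, k ≤ 25 → k + 1 ≤ (g k).length := by
      intro k
      induction k with
      | zero => intro _; rw [hg0]; simp
      | succ k ih =>
        intro hk
        obtain ⟨ex, hex⟩ := hpre k
        have hne : ex ≠ [] := by
          intro h; exact hcon k (by omega) (by rw [hex, h, List.append_nil])
        have := ih (by omega)
        rw [hex, List.length_append]
        have : 1 ≤ ex.length := List.length_pos_iff.mpr hne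
        omega
    have h25 := hlen 25 le_rfl
    obtain ⟨hnd, hr, _, _⟩ := hPB 25
    have := len_le_25 (g 25) hnd hr
    omega
  obtain ⟨k, hk, hfix⟩ := hstab
  have hconst : ∀ j, k ≤ j → g j = g k := by
    intro j
    induction j with
    | zero =>
      intro hj
      have hk0 : k = 0 := by omega
      rw [hk0]
    | succ j ih =>
      intro hj
      rcases Nat.eq_or_lt_of_le hj with h | h
      · rw [← h]
      · have hjk : k ≤ j := by omega
        rw [hgs, ih hjk, ← hgs, hfix]
  have hg25k : g 25 = g k := hconst 25 (by omega)
  have hclosed : ∀ x ∈ g 25, ∀ z, z ∈ nbr x → z ∈ comb → z ∈ g 25 := by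
    intro x hx z hz hc
    have hz25 : z ∈ f (g 25) := (mem_roundB ..).mpr (Or.inr ⟨x, hx, hz, hc⟩)
    rw [hg25k, ← hgs, hfix, ← hg25k] at hz25
    exact hz25
  have hPB25 := hPB 25
  have hgoal : PB comb c0 (g 25) ∧ (∀ y, y ∈ g 25 ↔ Reach comb c0 y) := by
    refine ⟨hPB25, ?_⟩
    intro y
    constructor
    · exact hPB25.2.2.1 y
    · intro hy
      induction hy with
      | refl => exact hPB25.2.2.2
      | tail hr hn hc ih => exact hclosed _ ih _ hn hc
  exact hgoal


lemma card_count_eq (visit : List Bool) (l : List Int) (hnd : l.Nodup)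
    (h : ∀ y, Vis visit y ↔ y ∈ l) : cardV visit = l.length := by
  rw [← List.toFinset_card_of_nodup hnd]
  unfold cardV
  refine Finset.card_bij (fun (a : Nat) (_ : a ∈ (Finset.range 25).filter (fun i => visit.getD i false = true)) => ((a : Int))) ?_ ?_ ?_
  · intro a ha
    simp only [Finset.mem_filter, Finset.mem_range] at ha
    show ((a : Int)) ∈ l.toFinset
    rw [List.mem_toFinset, ← h]
    exact ⟨by omega, by omega, by simpa using ha.2⟩
  · intro a _ b _ hab
    have hab' : ((a : Int)) = ((b : Int)) := hab
    exact_mod_cast hab'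
  · intro b hb
    rw [List.mem_toFinset, ← h] at hb
    obtain ⟨hb0, hb1, hbg⟩ := hb
    refine ⟨b.toNat, ?_, ?_⟩
    · simp only [Finset.mem_filter, Finset.mem_range]
      exact ⟨by omega, hbg⟩
    · show ((b.toNat : Int)) = b
      omega

-- ===== VERDICT (by name: the statement is the Claim_ definition above) =====
theorem adjacency_spec : Claim_equal_adjacency := by
  intro comb _hdom hpre
  unfold Spec_adjacency
  obtain ⟨hne, h0, h1⟩ := hpre
  cases comb with
  | nil => exact absurd rfl hne
  | cons c0 t =>
    simp only [List.headD_cons] at h0 h1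
    simp only [adjacency, adjacency_alt, PySem.List.pyGet?_zero_cons, List.nil_append]
    -- initial A state
    have hv0 : ((PySem.List.pyRange 0 25 1).map (fun _ => false) : List Bool) =
        List.replicate 25 false := by decide
    have hset1 : PySem.List.pySetD ((PySem.List.pyRange 0 25 1).map (fun _ => false)) c0 true =
        (List.replicate 25 false).set c0.toNat true := by
      rw [hv0, PySem.List.pySetD_of_nonneg _ _ h0]
    have hlen1 : (PySem.List.pySetD ((PySem.List.pyRange 0 25 1).map (fun _ => false)) c0 true).length = 25 := by
      rw [hset1]
      simp
    have hrepl : ∀ i : Nat, (List.replicate 25 false).getD i false = false := by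
      intro i
      by_cases hi : i < 25
      · rw [List.getD_eq_getElem _ _ (by simpa using hi), List.getElem_replicate]
      · rw [List.getD_eq_default _ _ (by simpa using hi)]
    have hVis1 : ∀ y, Vis (PySem.List.pySetD ((PySem.List.pyRange 0 25 1).map (fun _ => false)) c0 true) y ↔ y = c0 := by
      intro y
      rw [hset1]
      unfold Vis
      constructor
      · rintro ⟨hy0, hy1, hg⟩
        rw [getD_set_nat _ _ _ _ (by simp; omega)] at hg
        by_cases hye : y.toNat = c0.toNat
        · omega
        · rw [if_neg hye, hrepl] at hg
          exact absurd hg (by simp)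
      · rintro rfl
        refine ⟨h0, h1, ?_⟩
        rw [getD_set_nat _ _ _ _ (by simp; omega), if_pos rfl]
    have hcard1 : cardV (PySem.List.pySetD ((PySem.List.pyRange 0 25 1).map (fun _ => false)) c0 true) = 1 := by
      unfold cardV
      rw [hset1]
      have hfe : (Finset.range 25).filter
          (fun i => ((List.replicate 25 false).set c0.toNat true).getD i false = true) = {c0.toNat} := by
        ext i
        simp only [Finset.mem_filter, Finset.mem_range, Finset.mem_singleton]
        constructor
        · rintro ⟨hi, hgi⟩
          rw [getD_set_nat _ _ _ _ (by simp; omega)] at hgi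
          by_cases hie : i = c0.toNat
          · exact hie
          · rw [if_neg hie, hrepl] at hgi
            exact absurd hgi (by simp)
        · rintro rfl
          refine ⟨by omega, ?_⟩
          rw [getD_set_nat _ _ _ _ (by simp; omega), if_pos rfl]
      rw [hfe, Finset.card_singleton]
    have hInv : InvA (c0 :: t) c0
        (PySem.List.pySetD ((PySem.List.pyRange 0 25 1).map (fun _ => false)) c0 true) [c0] 1 := by
      refine ⟨hlen1, by rw [hcard1]; simp, (hVis1 c0).mpr rfl, ?_, ?_, ?_⟩
      · intro y hy
        rcases List.mem_singleton.mp hy with rfl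
        exact ⟨(hVis1 y).mpr rfl, Reach.refl⟩
      · intro y hv
        rcases (hVis1 y).mp hv with rfl
        exact Reach.refl
      · intro y hv hns z _ _
        rcases (hVis1 y).mp hv with rfl
        exact absurd (List.mem_singleton.mpr rfl) hns
    obtain ⟨visit', hwh, hvisR⟩ := whileA_run (c0 :: t) c0 50
      (PySem.List.pySetD ((PySem.List.pyRange 0 25 1).map (fun _ => false)) c0 true) [c0] 1 hInv
      (by rw [hcard1]; simp)
    simp only [hwh]
    -- B side
    have hofl : PySem.Set.ofList [c0] = [c0] :=
      PySem.Set.ofList_eq_self_of_nodup [c0] (List.nodup_singleton _)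
    rw [foldl_range_const (fun r => roundB (PySem.Set.ofList (c0 :: t)) r) 25, hofl]
    obtain ⟨hPB25, hmem⟩ := saturation (c0 :: t) c0 ⟨h0, h1⟩
    have hcnt : cardV visit' =
        ((fun r => roundB (PySem.Set.ofList (c0 :: t)) r)^[25] [c0]).length :=
      card_count_eq _ _ hPB25.1 (fun y => (hvisR y).trans (hmem y).symm)
    simp only [hcnt, PySem.Set.len]
    cases ((((fun r => roundB (PySem.Set.ofList (c0 :: t)) r)^[25] [c0]).length : Int) == 7)
    · simp
    · simp
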